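-- pv_equiv track=rewrite | github.com/Radcliffe/OEIS-Python | src/oeispy/A284/A284620.py | A284620
-- ===== SOURCE A (Python) =====
-- from math import isqrt
--
-- def A130568(n): return (n+isqrt(5*n**2)&-2)|1
--
-- def A284620(n):
--     def bsearch(f, n):
--         kmin, kmax = 0, 1
--         while f(kmax) <= n:
--             kmax <<= 1
--         kmin = kmax>>1
--         while True:
--             kmid = kmax+kmin>>1
--             if f(kmid) > n:
--                 kmax = kmid
--             else:
--                 kmin = kmid
--             if kmax-kmin <= 1:
--                 break
--         return kmin
--     return (2 if n>1 and A130568(bsearch(A130568,n))==n else 0) if n&1 else 1 # _Chai Wah Wu_, May 22 2025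
-- ===== SOURCE B (Python) =====
-- from math import isqrt
--
-- def A284620(n):
--     if n % 2 == 0:
--         return 1
--     if n <= 1:
--         return 0
--     k0 = (isqrt(5 * n * n) - n) // 4
--     for k in range(max(k0 - 2, 0), k0 + 3):
--         if ((k + isqrt(5 * k * k)) | 1) == n:
--             return 2
--     return 0
-- ===== Notes on version B (the rewrite author's own statement) =====
-- stated objective: alternative
-- what changed: For odd n the binary search over the monotone A130568 is replaced by a closed-form inverse estimate k0 = (isqrt(5*n*n)-n)//4 checked over a constant window of five candidates, so no bisection loop remains.
import Mathlib
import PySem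

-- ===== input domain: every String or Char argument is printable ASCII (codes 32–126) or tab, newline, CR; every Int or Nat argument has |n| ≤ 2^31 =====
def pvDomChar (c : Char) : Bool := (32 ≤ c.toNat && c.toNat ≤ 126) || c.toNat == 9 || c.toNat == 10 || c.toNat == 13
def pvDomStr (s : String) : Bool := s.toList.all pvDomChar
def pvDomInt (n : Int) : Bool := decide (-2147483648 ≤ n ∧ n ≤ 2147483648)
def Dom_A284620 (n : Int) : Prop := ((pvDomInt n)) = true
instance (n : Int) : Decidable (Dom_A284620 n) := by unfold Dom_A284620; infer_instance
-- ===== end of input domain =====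

-- B replaces A's binary search over the monotone A130568 by a closed-form inverse estimate
-- checked on a constant window of five candidates (objective: alternative — no bisection loop).

-- ===== PORT A =====
-- math.isqrt; exact for x ≥ 0 (every call site below passes 5*k*k ≥ 0)
def pyIsqrt (x : Int) : Int := ((x.toNat).sqrt : Int)

-- A130568(n) = (n+isqrt(5*n**2)&-2)|1
def A130568 (n : Int) : Int := PySem.Int.bor (PySem.Int.band (n + pyIsqrt (5 * n ^ 2)) (-2)) 1

-- 'while f(kmax) <= n: kmax <<= 1' — fuel only makes the loop total; enough fuel is proved below
def bsearchUp (n : Int) : Nat → Int → Int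
  | 0, kmax => kmax
  | fuel+1, kmax => if A130568 kmax ≤ n then bsearchUp n fuel (kmax <<< (1:Nat)) else kmax

-- the do-while bisection loop: body sets kmid, moves kmax or kmin, breaks when kmax-kmin <= 1
def bsearchDown (n : Int) : Nat → Int → Int → Int
  | 0, kmin, _ => kmin
  | fuel+1, kmin, kmax =>
    let kmid := (kmax + kmin) >>> (1:Nat)
    if n < A130568 kmid then
      if kmid - kmin ≤ 1 then kmin else bsearchDown n fuel kmin kmid
    else
      if kmax - kmid ≤ 1 then kmid else bsearchDown n fuel kmid kmax

def bsearch (n : Int) : Int :=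
  let kmax := bsearchUp n (n.toNat + 2) 1
  let kmin := kmax >>> (1:Nat)
  bsearchDown n (n.toNat + 2) kmin kmax

def A284620 (n : Int) : Int :=
  if PySem.Int.band n 1 ≠ 0 then
    (if 1 < n ∧ A130568 (bsearch n) = n then 2 else 0)
  else 1

-- ===== PORT B =====
def A284620_alt (n : Int) : Int :=
  if PySem.Int.mod n 2 = 0 then 1
  else if n ≤ 1 then 0
  else
    let k0 := PySem.Int.floordiv (pyIsqrt (5 * n * n) - n) 4
    if (PySem.List.pyRange (max (k0 - 2) 0) (k0 + 3) 1).any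
        (fun k => PySem.Int.bor (k + pyIsqrt (5 * k * k)) 1 == n)
    then 2 else 0

-- ===== PRECONDITION & SPEC =====
def Spec_A284620 (n : Int) (out : Int) : Prop := out = A284620_alt n
instance (n : Int) (out : Int) : Decidable (Spec_A284620 n out) := by unfold Spec_A284620; infer_instance

-- ===== CLAIM (what is proved, stated in full; the proofs are below) =====
def Claim_equal_A284620 : Prop := ∀ (n : Int), Dom_A284620 n → Spec_A284620 n (A284620 n)

-- ===== LEMMAS AND PROOFS =====

theorem lor_two_mul_one (b : Nat) : 2*b ||| 1 = 2*b+1 := by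
  have h := Nat.lor_bit false b true 0
  simpa [Nat.bit, Nat.mul_comm] using h

-- (x & -2) | 1 for x ≥ 0: clear the low bit then set it -- the odd member of {x, x+1}
theorem oddify_char (x : Int) (hx : 0 ≤ x) :
    PySem.Int.bor (PySem.Int.band x (-2)) 1 = 2 * (x / 2) + 1 := by
  unfold PySem.Int.band PySem.Int.bor
  rw [if_pos hx]
  simp only [show ¬((0:Int) ≤ -2) by decide, if_false, show ((0:Int) ≤ 1) by decide, if_true,
    show ((- -2 - 1 : Int)).toNat = 1 from by decide, Nat.and_one_is_mod]
  have hnn : (0:Int) ≤ ↑(x.toNat - x.toNat % 2) := by positivity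
  rw [if_pos hnn]
  have he : x.toNat - x.toNat % 2 = 2 * (x.toNat / 2) := by omega
  rw [Int.toNat_natCast, show ((1:Int)).toNat = 1 from rfl, he, lor_two_mul_one]
  omega

-- x | 1 for x ≥ 0 is the same odd value
theorem lor_two_mul_add_one (b : Nat) : 2*b+1 ||| 1 = 2*b+1 := by
  have h := Nat.lor_bit true b true 0
  simpa [Nat.bit, Nat.mul_comm] using h

theorem oddify_char' (x : Int) (hx : 0 ≤ x) :
    PySem.Int.bor x 1 = 2 * (x / 2) + 1 := by
  unfold PySem.Int.bor
  rw [if_pos hx, if_pos (by decide : (0:Int) ≤ 1)]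
  rw [show ((1:Int)).toNat = 1 from rfl]
  have hm : x.toNat % 2 = 0 ∨ x.toNat % 2 = 1 := by omega
  rcases hm with h | h
  · have hx0 : x.toNat = 2 * (x.toNat / 2) := by omega
    have hl : x.toNat ||| 1 = 2 * (x.toNat / 2) + 1 := by
      conv_lhs => rw [hx0]
      rw [lor_two_mul_one]
    rw [hl]; omega
  · have hx0 : x.toNat = 2 * (x.toNat / 2) + 1 := by omega
    have hl : x.toNat ||| 1 = 2 * (x.toNat / 2) + 1 := by
      conv_lhs => rw [hx0]
      rw [lor_two_mul_add_one]
    rw [hl]; omega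

theorem pyIsqrt_nonneg (x : Int) : 0 ≤ pyIsqrt x := by
  unfold pyIsqrt; positivity

theorem pyIsqrt_sq_le (x : Int) (hx : 0 ≤ x) : (pyIsqrt x)^2 ≤ x := by
  unfold pyIsqrt
  have h : x.toNat.sqrt ^ 2 ≤ x.toNat := Nat.sqrt_le' x.toNat
  have h2 : ((x.toNat.sqrt : Int)) ^ 2 ≤ ((x.toNat : Nat) : Int) := by exact_mod_cast h
  rw [Int.toNat_of_nonneg hx] at h2
  exact h2

theorem pyIsqrt_lt_succ_sq (x : Int) : x < (pyIsqrt x + 1)^2 := by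
  unfold pyIsqrt
  have h : x.toNat < (x.toNat.sqrt + 1) ^ 2 := Nat.lt_succ_sqrt' x.toNat
  have h2 : ((x.toNat : Nat) : Int) < ((x.toNat.sqrt : Int) + 1) ^ 2 := by exact_mod_cast h
  exact lt_of_le_of_lt (Int.self_le_toNat x) h2

theorem le_pyIsqrt (x a : Int) (ha : 0 ≤ a) (h : a^2 ≤ x) : a ≤ pyIsqrt x := by
  by_contra hc
  push_neg at hc
  have := pyIsqrt_lt_succ_sq x
  nlinarith [pyIsqrt_nonneg x]

-- value of A130568 for k ≥ 0
theorem fval (k : Int) (hk : 0 ≤ k) :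
    A130568 k = 2 * ((k + pyIsqrt (5 * k ^ 2)) / 2) + 1 := by
  unfold A130568
  exact oddify_char _ (by have := pyIsqrt_nonneg (5 * k ^ 2); omega)

theorem fbounds (k : Int) (hk : 0 ≤ k) :
    k + pyIsqrt (5 * k ^ 2) ≤ A130568 k ∧ A130568 k ≤ k + pyIsqrt (5 * k ^ 2) + 1 := by
  rw [fval k hk]
  omega

theorem f_ge (k : Int) (hk : 0 ≤ k) : 2 * k + 1 ≤ A130568 k := by
  have hb := fbounds k hk
  have hs : 2 * k ≤ pyIsqrt (5 * k ^ 2) := le_pyIsqrt _ _ (by omega) (by nlinarith)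
  rcases eq_or_lt_of_le hk with h | h
  · rw [fval k hk]
    have : pyIsqrt (5 * k ^ 2) = 0 := by rw [← h]; decide
    omega
  · omega

theorem f_step (k : Int) (hk : 0 ≤ k) : A130568 k + 2 ≤ A130568 (k + 1) := by
  have h1 := fbounds k hk
  have h2 := fbounds (k+1) (by omega)
  have hs1 := pyIsqrt_sq_le (5 * k ^ 2) (by positivity)
  have hs2 := pyIsqrt_lt_succ_sq (5 * k ^ 2)
  have hn1 := pyIsqrt_nonneg (5 * k ^ 2)
  -- isqrt(5(k+1)²) ≥ isqrt(5k²) + 2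
  have key : pyIsqrt (5 * k ^ 2) + 2 ≤ pyIsqrt (5 * (k+1) ^ 2) := by
    apply le_pyIsqrt _ _ (by omega)
    nlinarith [sq_nonneg (5*k - 2*pyIsqrt (5 * k ^ 2)), sq_nonneg (pyIsqrt (5 * k ^ 2) - 2*k)]
  omega

theorem f_mono (a b : Int) (ha : 0 ≤ a) (hab : a ≤ b) : A130568 a ≤ A130568 b := by
  have h : ∀ d : Nat, A130568 a ≤ A130568 (a + d) := by
    intro d
    induction d with
    | zero => simp
    | succ m ih =>
      have hst := f_step (a + m) (by omega)
      have hc : a + (((m+1 : Nat)) : Int) = (a + m) + 1 := by push_cast; ring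
      rw [hc]
      omega
  have hd : b = a + ((b - a).toNat : Int) := by omega
  rw [hd]; exact h _

theorem shl1 (x : Int) : x <<< (1:Nat) = 2 * x := by
  rw [Int.shiftLeft_eq]; ring

theorem shr1 (x : Int) : x >>> (1:Nat) = x / 2 := by
  rw [Int.shiftRight_eq_div_pow]; norm_num

theorem up_correct (n : Int) (hn : 3 ≤ n) :
    ∀ (fuel : Nat) (kmax : Int), 0 < kmax → kmax ≤ n → A130568 (kmax / 2) ≤ n →
      n.toNat + 1 ≤ fuel + kmax.toNat →
      0 < bsearchUp n fuel kmax ∧ bsearchUp n fuel kmax ≤ n ∧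
        n < A130568 (bsearchUp n fuel kmax) ∧ A130568 ((bsearchUp n fuel kmax) / 2) ≤ n := by
  intro fuel
  induction fuel with
  | zero =>
    intro kmax h1 h2 _ h4
    omega
  | succ m ih =>
    intro kmax h1 h2 h3 h4
    rw [bsearchUp]
    by_cases hg : A130568 kmax ≤ n
    · rw [if_pos hg, shl1 kmax]
      have hge := f_ge kmax (by omega)
      exact ih (2 * kmax) (by omega) (by omega)
        (by rw [show 2 * kmax / 2 = kmax by omega]; exact hg) (by omega)
    · rw [if_neg hg]
      exact ⟨h1, h2, by omega, h3⟩

theorem down_correct (n : Int) (_hn : 3 ≤ n) :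
    ∀ (fuel : Nat) (kmin kmax : Int), 0 ≤ kmin → kmin < kmax →
      A130568 kmin ≤ n → n < A130568 kmax → (kmax - kmin).toNat ≤ fuel + 1 →
      0 ≤ bsearchDown n fuel kmin kmax ∧ A130568 (bsearchDown n fuel kmin kmax) ≤ n ∧
        n < A130568 (bsearchDown n fuel kmin kmax + 1) := by
  intro fuel
  induction fuel with
  | zero =>
    intro kmin kmax h1 h2 h3 h4 h5
    have he : kmax = kmin + 1 := by omega
    rw [bsearchDown]
    exact ⟨h1, h3, by rw [← he]; exact h4⟩
  | succ m ih =>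
    intro kmin kmax h1 h2 h3 h4 h5
    rw [bsearchDown]
    simp only [shr1]
    set kmid := (kmax + kmin) / 2 with hmid
    have hb : kmin ≤ kmid ∧ kmid < kmax := by omega
    by_cases hg : n < A130568 kmid
    · rw [if_pos hg]
      have hne : kmin ≠ kmid := by
        intro h; rw [← h] at hg; omega
      by_cases hsm : kmid - kmin ≤ 1
      · rw [if_pos hsm]
        refine ⟨h1, h3, ?_⟩
        have : kmid = kmin + 1 := by omega
        rwa [← this]
      · rw [if_neg hsm]
        exact ih kmin kmid h1 (by omega) h3 hg (by omega)
    · rw [if_neg hg]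
      push_neg at hg
      by_cases hsm : kmax - kmid ≤ 1
      · rw [if_pos hsm]
        refine ⟨by omega, hg, ?_⟩
        have : kmax = kmid + 1 := by omega
        rwa [← this]
      · rw [if_neg hsm]
        exact ih kmid kmax (by omega) (by omega) hg h4 (by omega)

theorem f_zero : A130568 0 = 1 := by decide

theorem bsearch_correct (n : Int) (hn : 3 ≤ n) :
    0 ≤ bsearch n ∧ A130568 (bsearch n) ≤ n ∧ n < A130568 (bsearch n + 1) := by
  unfold bsearch
  simp only [shr1]
  have hup := up_correct n hn (n.toNat + 2) 1 (by omega) (by omega)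
    (by rw [show (1:Int)/2 = 0 by decide, f_zero]; omega) (by omega)
  set K := bsearchUp n (n.toNat + 2) 1 with hK
  have hKd : K / 2 < K := by omega
  exact down_correct n hn (n.toNat + 2) (K / 2) K (by omega) hKd hup.2.2.2 hup.2.2.1 (by omega)

-- B's candidate value equals A130568 on k ≥ 0
theorem gval (k : Int) (hk : 0 ≤ k) :
    PySem.Int.bor (k + pyIsqrt (5 * k * k)) 1 = A130568 k := by
  have he : 5 * k * k = 5 * k ^ 2 := by ring
  rw [he, oddify_char' _ (by have := pyIsqrt_nonneg (5 * k ^ 2); omega), fval k hk]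

theorem sq_lt_imp (a b : Int) (hb : 0 ≤ b) (h : a^2 < b^2) : a < b := by
  by_contra hc
  push_neg at hc
  nlinarith

theorem win_upper (j s n : Int) (hj : 0 ≤ j) (hs : 0 ≤ s) (h1 : s^2 ≤ 5*j^2)
    (hn1 : j + s ≤ n) (hn2 : n ≤ j + s + 1) (hn3 : 3 ≤ n) :
    5*n^2 < (n + 4*j + 12)^2 := by
  nlinarith [sq_nonneg (5*j - 2*s), mul_nonneg hj hs,
    mul_nonneg (sub_nonneg.2 hn1) (sub_nonneg.2 hn1)]

theorem win_lower (j s n : Int) (hj : 0 ≤ j) (hs : 0 ≤ s) (h1 : s^2 ≤ 5*j^2)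
    (h2 : 5*j^2 < (s+1)^2) (hn1 : j + s ≤ n) (hn2 : n ≤ j + s + 1) (hn3 : 3 ≤ n) :
    (n + 4*j - 8)^2 ≤ 5*n^2 := by
  nlinarith [sq_nonneg (5*j - 2*s), mul_nonneg hj hs, sq_nonneg (s - 2*j)]

-- any root of A130568 n lies in B's constant window around k0
theorem window_lemma (n j : Int) (hn : 3 ≤ n) (hj : 0 ≤ j) (hf : A130568 j = n) :
    PySem.Int.floordiv (pyIsqrt (5 * n * n) - n) 4 - 2 ≤ j ∧
      j ≤ PySem.Int.floordiv (pyIsqrt (5 * n * n) - n) 4 + 2 := by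
  have he : 5 * n * n = 5 * n ^ 2 := by ring
  rw [he]
  set s := pyIsqrt (5 * j ^ 2) with hs
  set t := pyIsqrt (5 * n ^ 2) with ht
  have hb := fbounds j hj
  have hx : j + s ≤ n ∧ n ≤ j + s + 1 := by rw [hf] at hb; omega
  have hs0 : 0 ≤ s := pyIsqrt_nonneg _
  have ht0 : 0 ≤ t := pyIsqrt_nonneg _
  have hs1 : s^2 ≤ 5*j^2 := pyIsqrt_sq_le _ (by positivity)
  have hs2 : 5*j^2 < (s+1)^2 := pyIsqrt_lt_succ_sq _
  have ht1 : t^2 ≤ 5*n^2 := pyIsqrt_sq_le _ (by positivity)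
  have ht2 : 5*n^2 < (t+1)^2 := pyIsqrt_lt_succ_sq _
  -- upper bound on t
  have hup : t ≤ n + 4*j + 11 := by
    have hq := win_upper j s n hj hs0 hs1 hx.1 hx.2 hn
    have := sq_lt_imp t (n + 4*j + 12) (by omega) (lt_of_le_of_lt ht1 hq)
    omega
  -- lower bound on t
  have hlo : n + 4*j - 8 ≤ t := by
    by_cases hneg : n + 4*j - 8 ≤ 0
    · omega
    · have hq := win_lower j s n hj hs0 hs1 hs2 hx.1 hx.2 hn
      have := sq_lt_imp (n + 4*j - 8) (t + 1) (by omega) (lt_of_le_of_lt hq ht2)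
      omega
  rw [PySem.Int.floordiv_eq_ediv_of_pos (by omega)]
  omega

-- uniqueness of the root
theorem root_unique (n j r : Int) (hj : 0 ≤ j) (hr : 0 ≤ r)
    (hfj : A130568 j = n) (h1 : A130568 r ≤ n) (h2 : n < A130568 (r + 1)) : j = r := by
  by_contra hne
  rcases lt_or_gt_of_ne hne with h | h
  · have hs := f_step j hj
    have hm := f_mono (j+1) r (by omega) (by omega)
    omega
  · have hm := f_mono (r+1) j (by omega) (by omega)
    omega

theorem main_eq (n : Int) : A284620 n = A284620_alt n := by
  unfold A284620 A284620_alt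
  have hb1 : PySem.Int.band n 1 = PySem.Int.mod n 2 := PySem.Int.band_one n
  have hm : PySem.Int.mod n 2 = n % 2 := PySem.Int.mod_eq_emod_of_pos (by omega)
  by_cases hev : n % 2 = 0
  · rw [hb1, hm, hev]
    rw [if_neg (by omega : ¬ (0:Int) ≠ 0), if_pos (rfl : (0:Int) = 0)]
  · have hodd : n % 2 = 1 := by omega
    rw [hb1, hm, hodd]
    rw [if_pos (by omega : (1:Int) ≠ 0), if_neg (by omega : ¬ (1:Int) = 0)]
    by_cases hle : n ≤ 1
    · rw [if_pos hle, if_neg (by omega : ¬ (1 < n ∧ A130568 (bsearch n) = n))]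
    · have hn3 : 3 ≤ n := by omega
      rw [if_neg hle]
      obtain ⟨hr0, hr1, hr2⟩ := bsearch_correct n hn3
      set r := bsearch n with hrdef
      set k0 := PySem.Int.floordiv (pyIsqrt (5 * n * n) - n) 4 with hk0
      have key : (A130568 r = n) ↔
          ((PySem.List.pyRange (max (k0 - 2) 0) (k0 + 3) 1).any
            (fun k => PySem.Int.bor (k + pyIsqrt (5 * k * k)) 1 == n) = true) := by
        constructor
        · intro hfr
          rw [List.any_eq_true]
          refine ⟨r, ?_, ?_⟩
          · rw [PySem.List.mem_pyRange_one]
            have hw := window_lemma n r hn3 hr0 hfr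
            rw [← hk0] at hw
            omega
          · rw [gval r hr0]
            simp [hfr]
        · intro h
          rw [List.any_eq_true] at h
          obtain ⟨k, hkmem, hkeq⟩ := h
          rw [PySem.List.mem_pyRange_one] at hkmem
          have hknn : 0 ≤ k := le_trans (le_max_right _ _) hkmem.1
          rw [gval k hknn] at hkeq
          have hfk : A130568 k = n := by simpa using hkeq
          have hkr := root_unique n k r hknn hr0 hfk hr1 hr2
          rw [← hkr]
          exact hfk
      by_cases hroot : A130568 r = n
      · rw [if_pos ⟨by omega, hroot⟩, if_pos (key.1 hroot)]
      · rw [if_neg (fun hc => hroot hc.2), if_neg (fun hc => hroot (key.2 hc))]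

-- ===== VERDICT (by name: the statement is the Claim_ definition above) =====
theorem A284620_spec : Claim_equal_A284620 := by
  intro n _
  unfold Spec_A284620
  exact main_eq n
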